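-- pv_equiv track=rewrite | github.com/danielle34/FASH-iCNN | temporal_identity/decade/dataset.py | year_to_decade_idx
-- ===== SOURCE A (Python) =====
-- DECADES = [
--     ("1991-2000", 1991, 2000),
--     ("2001-2010", 2001, 2010),
--     ("2011-2020", 2011, 2020),
--     ("2021-2024", 2021, 2024),
-- ]
--
-- def year_to_decade_idx(year):
--     """Return decade index 0..3 or None if out of range / invalid."""
--     try:
--         y = int(year)
--     except (TypeError, ValueError):
--         return None
--     for i, (_, lo, hi) in enumerate(DECADES):
--         if lo <= y <= hi:
--             return i
--     return None
-- ===== SOURCE B (Python) =====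
-- def year_to_decade_idx(year):
--     """Return decade index 0..3 or None if out of range / invalid."""
--     try:
--         y = int(year)
--     except (TypeError, ValueError):
--         return None
--     if 1991 <= y <= 2024:
--         return (y - 1991) // 10
--     return None
-- ===== Notes on version B (the rewrite author's own statement) =====
-- stated objective: simpler
-- what changed: Replaces the enumerate-loop over the DECADES table with a single range guard and a closed-form floor division (y-1991)//10.
import Mathlib
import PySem

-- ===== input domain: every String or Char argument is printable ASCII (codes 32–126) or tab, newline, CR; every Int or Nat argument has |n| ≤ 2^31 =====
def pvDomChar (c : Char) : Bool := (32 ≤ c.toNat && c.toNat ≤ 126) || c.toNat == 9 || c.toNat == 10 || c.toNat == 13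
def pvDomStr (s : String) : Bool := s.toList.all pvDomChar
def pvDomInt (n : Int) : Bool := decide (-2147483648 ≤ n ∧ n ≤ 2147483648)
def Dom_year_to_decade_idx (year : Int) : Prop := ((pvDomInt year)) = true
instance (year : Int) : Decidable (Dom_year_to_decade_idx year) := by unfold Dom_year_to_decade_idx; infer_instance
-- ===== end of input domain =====

-- Note: with an Int argument, Python's int(year) always succeeds, so the
-- try/except prologue of both Pythons is the identity here.

-- ===== PORT A =====
def DECADES : List (String × Int × Int) :=
  [("1991-2000", 1991, 2000), ("2001-2010", 2001, 2010),
   ("2011-2020", 2011, 2020), ("2021-2024", 2021, 2024)]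

-- the 'for i, (_, lo, hi) in enumerate(DECADES)' loop, returning the first matching index
def year_to_decade_idx_loop (y : Int) : List (Int × String × Int × Int) → Option Int
  | [] => none
  | (i, _, lo, hi) :: rest =>
      if lo ≤ y ∧ y ≤ hi then some i else year_to_decade_idx_loop y rest

def year_to_decade_idx (year : Int) : Option Int :=
  year_to_decade_idx_loop year (PySem.List.enumerate DECADES)

-- ===== PORT B =====
def year_to_decade_idx_alt (year : Int) : Option Int :=
  if 1991 ≤ year ∧ year ≤ 2024 then some (PySem.Int.floordiv (year - 1991) 10)
  else none

-- ===== PRECONDITION & SPEC =====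
def Spec_year_to_decade_idx (year : Int) (out : Option Int) : Prop := out = year_to_decade_idx_alt year
instance (year : Int) (out : Option Int) : Decidable (Spec_year_to_decade_idx year out) := by unfold Spec_year_to_decade_idx; infer_instance

-- ===== CLAIM (what is proved, stated in full; the proofs are below) =====
def Claim_equal_year_to_decade_idx : Prop := ∀ (year : Int), Dom_year_to_decade_idx year → Spec_year_to_decade_idx year (year_to_decade_idx year)

-- ===== LEMMAS AND PROOFS =====

-- ===== VERDICT (by name: the statement is the Claim_ definition above) =====
theorem year_to_decade_idx_spec : Claim_equal_year_to_decade_idx := by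
  intro year _
  unfold Spec_year_to_decade_idx year_to_decade_idx year_to_decade_idx_alt DECADES
  simp [PySem.List.enumerate, year_to_decade_idx_loop, PySem.Int.floordiv]
  split_ifs <;> simp_all [Int.fdiv_eq_ediv] <;> omega
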